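-- pv_equiv track=rewrite | github.com/xjw1001001/IGCrebuild | docs/tut05/transform-data.py | canonical
-- ===== SOURCE A (Python) =====
-- def canonical(seq_in):
--     d = {}
--     seq_out = []
--     for x in seq_in:
--         if x not in d:
--             d[x] = len(d)
--         seq_out.append(d[x])
--     return seq_out
-- ===== SOURCE B (Python) =====
-- def canonical(seq_in):
--     # label of x = number of distinct values strictly before x's first occurrence
--     return [len(set(seq_in[:seq_in.index(x)])) for x in seq_in]
-- ===== Notes on version B (the rewrite author's own statement) =====
-- stated objective: alternative
-- what changed: Drops A's dict entirely: instead of a single pass growing a table with len(d) ids, B computes each label independently as the number of distinct values in the slice before the element's first occurrence (len(set(seq[:seq.index(x)]))), trading A's O(n) hash pass for a direct per-element set/slice computation.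
import Mathlib
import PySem

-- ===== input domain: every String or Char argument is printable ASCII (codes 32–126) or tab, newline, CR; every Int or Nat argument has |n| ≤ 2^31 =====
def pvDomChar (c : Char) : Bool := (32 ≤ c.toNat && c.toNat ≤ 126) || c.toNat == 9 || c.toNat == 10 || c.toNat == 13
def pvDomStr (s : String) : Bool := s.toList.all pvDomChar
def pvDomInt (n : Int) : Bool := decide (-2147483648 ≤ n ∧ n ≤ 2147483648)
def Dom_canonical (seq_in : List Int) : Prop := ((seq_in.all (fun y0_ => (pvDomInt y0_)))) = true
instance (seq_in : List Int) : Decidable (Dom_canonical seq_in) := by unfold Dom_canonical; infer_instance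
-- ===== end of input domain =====

-- B drops A's dict entirely: each label is computed independently as the number of
-- distinct values before the element's first occurrence (alternative algorithm, not faster).

-- ===== PORT A =====
-- one pass: if x not in d: d[x] = len(d); seq_out.append(d[x])
def canonical (seq_in : List Int) : List Int :=
  (seq_in.foldl
    (fun (st : PySem.Dict Int Int × List Int) x =>
      let d := if st.1.contains x then st.1 else st.1.insert x (st.1.size : Int)
      (d, st.2 ++ [(d.get? x).getD 0]))   -- d[x]: x is always a key here, so the KeyError default is unreachable
    (PySem.Dict.empty, [])).2

-- ===== PORT B =====
-- [len(set(seq_in[:seq_in.index(x)])) for x in seq_in]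
def canonical_alt (seq_in : List Int) : List Int :=
  seq_in.map (fun x =>
    -- seq_in.index(x): x ∈ seq_in, so the ValueError default is unreachable
    let j : Int := ((PySem.List.index? seq_in x).getD 0 : Nat)
    ((PySem.Set.ofList (PySem.List.slice seq_in none (some j))).length : Int))

-- ===== PRECONDITION & SPEC =====
def Spec_canonical (seq_in : List Int) (out : List Int) : Prop := out = canonical_alt seq_in
instance (seq_in : List Int) (out : List Int) : Decidable (Spec_canonical seq_in out) := by unfold Spec_canonical; infer_instance

-- ===== CLAIM (what is proved, stated in full; the proofs are below) =====
def Claim_equal_canonical : Prop := ∀ (seq_in : List Int), Dom_canonical seq_in → Spec_canonical seq_in (canonical seq_in)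

-- ===== LEMMAS AND PROOFS =====

lemma dedup_append_singleton (pre : List Int) (x : Int) :
    PySem.List.dedup (pre ++ [x]) =
      if x ∈ pre then PySem.List.dedup pre else PySem.List.dedup pre ++ [x] := by
  simp only [PySem.List.dedup_eq_ofList, PySem.Set.ofList_eq_foldl, List.foldl_append,
    List.foldl_cons, List.foldl_nil]
  have : (List.foldl PySem.Set.add [] pre).contains x = decide (x ∈ pre) := by
    simp [PySem.Set.contains, ← PySem.Set.ofList_eq_foldl, PySem.Set.mem_ofList]
  simp only [PySem.Set.add, this]
  split_ifs <;> simp_all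

lemma foldl_add_extends (rest : List Int) (s : PySem.Set Int) :
    ∃ t, rest.foldl PySem.Set.add s = s ++ t := by
  induction rest generalizing s with
  | nil => exact ⟨[], by simp⟩
  | cons a rest ih =>
    obtain ⟨t, ht⟩ := ih (PySem.Set.add s a)
    rw [List.foldl_cons, ht]
    by_cases h : a ∈ s
    · exact ⟨t, by simp [PySem.Set.add, PySem.Set.contains, h]⟩
    · exact ⟨a :: t, by simp [PySem.Set.add, PySem.Set.contains, h]⟩

lemma dedup_prefix (pre rest : List Int) :
    ∃ t, PySem.List.dedup (pre ++ rest) = PySem.List.dedup pre ++ t := by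
  simp only [PySem.List.dedup_eq_ofList, PySem.Set.ofList_eq_foldl, List.foldl_append]
  exact foldl_add_extends rest _

lemma step_inv (pre : List Int) (x : Int) (d : PySem.Dict Int Int)
    (hget : ∀ y, d.get? y = (PySem.List.index? (PySem.List.dedup pre) y).map Int.ofNat)
    (hsize : d.size = (PySem.List.dedup pre).length) :
    (∀ y, (if d.contains x then d else d.insert x (d.size : Int)).get? y
        = (PySem.List.index? (PySem.List.dedup (pre ++ [x])) y).map Int.ofNat) ∧
    (if d.contains x then d else d.insert x (d.size : Int)).size
        = (PySem.List.dedup (pre ++ [x])).length := by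
  have hmem : ∀ y : Int, y ∈ PySem.List.dedup pre ↔ y ∈ pre := fun y => by
    simp
  by_cases hx : x ∈ pre
  · have hc : d.contains x = true := by
      rw [PySem.Dict.contains_eq_isSome_get?, hget x, Option.isSome_map,
        PySem.List.index?_isSome_iff]
      exact (hmem x).mpr hx
    rw [dedup_append_singleton]
    simp only [hx, if_true, hc]
    exact ⟨hget, hsize⟩
  · have hxd : x ∉ PySem.List.dedup pre := by rw [hmem]; exact hx
    have hc : d.contains x = false := by
      rw [PySem.Dict.contains_eq_isSome_get?, hget x,
        (PySem.List.index?_eq_none_iff _ _).mpr hxd]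
      rfl
    rw [dedup_append_singleton]
    simp only [hx, if_false, hc, Bool.false_eq_true]
    constructor
    · intro y
      by_cases hy : y = x
      · subst hy
        rw [PySem.Dict.get?_insert_self, PySem.List.index?_append_singleton_self _ y hxd]
        simp [hsize]
      · rw [PySem.Dict.get?_insert_of_ne _ _ hy]
        by_cases hyd : y ∈ PySem.List.dedup pre
        · rw [PySem.List.index?_append_of_mem _ hyd, hget]
        · rw [hget y, (PySem.List.index?_eq_none_iff _ _).mpr hyd,
            (PySem.List.index?_eq_none_iff _ _).mpr (by
              intro h
              rcases List.mem_append.mp h with h | h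
              · exact hyd h
              · exact hy (List.mem_singleton.mp h))]
    · rw [PySem.Dict.size_insert]
      simp [hc, hsize]

lemma canonical_loop (rest : List Int) :
    ∀ (pre : List Int) (d : PySem.Dict Int Int) (acc : List Int),
    (∀ y, d.get? y = (PySem.List.index? (PySem.List.dedup pre) y).map Int.ofNat) →
    d.size = (PySem.List.dedup pre).length →
    (rest.foldl
      (fun (st : PySem.Dict Int Int × List Int) x =>
        let d := if st.1.contains x then st.1 else st.1.insert x (st.1.size : Int)
        (d, st.2 ++ [(d.get? x).getD 0])) (d, acc)).2
      = acc ++ rest.map (fun x =>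
          (((PySem.List.index? (PySem.List.dedup (pre ++ rest)) x).getD 0 : Nat) : Int)) := by
  induction rest with
  | nil => intro pre d acc _ _; simp
  | cons x rest ih =>
    intro pre d acc hget hsize
    obtain ⟨hget', hsize'⟩ := step_inv pre x d hget hsize
    rw [List.foldl_cons]
    show (List.foldl _
      ((if d.contains x then d else d.insert x (d.size : Int)),
       acc ++ [((if d.contains x then d else d.insert x (d.size : Int)).get? x).getD 0]) rest).2 = _
    rw [ih (pre ++ [x]) _ _ hget' hsize']
    have hxm : x ∈ PySem.List.dedup (pre ++ [x]) := by simp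
    obtain ⟨t, ht⟩ := dedup_prefix (pre ++ [x]) rest
    have hidx : PySem.List.index? (PySem.List.dedup (pre ++ x :: rest)) x
        = PySem.List.index? (PySem.List.dedup (pre ++ [x])) x := by
      rw [show pre ++ x :: rest = (pre ++ [x]) ++ rest by simp, ht,
        PySem.List.index?_append_of_mem _ hxm]
    obtain ⟨k, hk⟩ : ∃ k, PySem.List.index? (PySem.List.dedup (pre ++ [x])) x = some k := by
      rw [← Option.isSome_iff_exists, PySem.List.index?_isSome_iff]
      exact hxm
    rw [show (pre ++ [x]) ++ rest = pre ++ x :: rest by simp, hget' x]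
    simp only [List.map_cons]
    rw [hidx, hk]
    simp

lemma canonical_loop_top (seq : List Int) :
    (seq.foldl
      (fun (st : PySem.Dict Int Int × List Int) x =>
        let d := if st.1.contains x then st.1 else st.1.insert x (st.1.size : Int)
        (d, st.2 ++ [(d.get? x).getD 0])) (PySem.Dict.empty, [])).2
      = seq.map (fun x => (((PySem.List.index? (PySem.List.dedup seq) x).getD 0 : Nat) : Int)) := by
  have h := canonical_loop seq [] PySem.Dict.empty [] (fun y => rfl) rfl
  simpa using h

-- the label of x: its index in the dedup equals the number of distinct values before its first occurrence
lemma index_dedup_eq_card_prefix (seq : List Int) (x : Int) (j : Nat)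
    (hj : PySem.List.index? seq x = some j) :
    PySem.List.index? (PySem.List.dedup seq) x
      = some (PySem.List.dedup (seq.take j)).length := by
  obtain ⟨pre, suf, hseq, hlen, hxp⟩ := (PySem.List.index?_eq_some_iff _ _ _).mp hj
  subst hseq
  have htake : (pre ++ x :: suf).take j = pre := by
    rw [← hlen, List.take_left]
  rw [htake]
  have hxd : x ∉ PySem.List.dedup pre := by simpa using hxp
  obtain ⟨t, ht⟩ := dedup_prefix (pre ++ [x]) suf
  rw [show pre ++ x :: suf = (pre ++ [x]) ++ suf by simp, ht]
  have hxm : x ∈ PySem.List.dedup (pre ++ [x]) := by simp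
  rw [PySem.List.index?_append_of_mem _ hxm, dedup_append_singleton]
  simp only [hxp, if_false]
  exact PySem.List.index?_append_singleton_self _ x hxd

-- ===== VERDICT (by name: the statement is the Claim_ definition above) =====
theorem canonical_spec : Claim_equal_canonical := by
  intro seq_in _
  unfold Spec_canonical canonical canonical_alt
  rw [canonical_loop_top]
  refine List.map_congr_left (fun x hx => ?_)
  obtain ⟨j, hj⟩ : ∃ j, PySem.List.index? seq_in x = some j := by
    rw [← Option.isSome_iff_exists, PySem.List.index?_isSome_iff]; exact hx
  rw [index_dedup_eq_card_prefix seq_in x j hj]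
  simp only [hj, Option.getD_some, PySem.List.slice_to_natCast]
  simp [PySem.List.dedup_eq_ofList]
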